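-- pv_equiv track=rewrite | github.com/arturresendesilveira2015-star/C-mera-para-jogo-sei-l- | import pyautogui.py | sao_proximas
-- ===== SOURCE A (Python) =====
-- def sao_proximas(cor):
--     maximo = [0, 0, 0]
--     minimo = [0, 0, 0]
--     for i in range(3):
--         maximo[i] = cor[i] + 5
--         minimo[i] = cor[i] - 5
--     o_que_retornar = True
--     for x in range(3):
--         for i in range(3):
--             if cor[i] < minimo[x] or cor[i] > maximo[x]:
--                 o_que_retornar = False
--     return o_que_retornar
-- ===== SOURCE B (Python) =====
-- def sao_proximas(cor):
--     a, b, c = cor[0], cor[1], cor[2]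
--     return max(a, b, c) - min(a, b, c) <= 5
-- ===== Notes on version B (the rewrite author's own statement) =====
-- stated objective: simpler
-- what changed: Replaces the 3x3 all-pairs comparison against per-channel +/-5 windows by one range test: max - min of the three channels <= 5.
import Mathlib
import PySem

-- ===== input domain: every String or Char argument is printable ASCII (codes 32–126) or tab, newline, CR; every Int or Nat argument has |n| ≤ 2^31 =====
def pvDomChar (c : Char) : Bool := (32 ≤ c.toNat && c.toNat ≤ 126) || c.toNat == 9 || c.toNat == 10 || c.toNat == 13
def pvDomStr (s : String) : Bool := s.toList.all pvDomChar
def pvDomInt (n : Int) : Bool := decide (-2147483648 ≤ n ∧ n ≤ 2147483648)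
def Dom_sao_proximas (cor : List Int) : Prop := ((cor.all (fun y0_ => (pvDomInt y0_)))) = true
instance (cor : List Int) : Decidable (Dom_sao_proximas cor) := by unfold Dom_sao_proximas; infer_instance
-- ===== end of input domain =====

-- B replaces A's 3x3 per-channel ±5-window comparison by a single max-min ≤ 5 range test (simpler).

-- ===== PORT A =====
def sao_proximas (cor : List Int) : Bool :=
  -- maximo = [0,0,0]; minimo = [0,0,0]; for i in range(3): maximo[i]=cor[i]+5; minimo[i]=cor[i]-5
  let mm := (PySem.List.pyRange 0 3 1).foldl
    (fun (p : List Int × List Int) i =>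
      (p.1.set i.toNat (PySem.List.pyGetD cor i 0 + 5),
       p.2.set i.toNat (PySem.List.pyGetD cor i 0 - 5)))
    ([0, 0, 0], [0, 0, 0])
  -- o_que_retornar = True; for x in range(3): for i in range(3): if cor[i] < minimo[x] or cor[i] > maximo[x]: o_que_retornar = False
  (PySem.List.pyRange 0 3 1).foldl
    (fun r x =>
      (PySem.List.pyRange 0 3 1).foldl
        (fun r i =>
          if PySem.List.pyGetD cor i 0 < PySem.List.pyGetD mm.2 x 0 ∨
             PySem.List.pyGetD cor i 0 > PySem.List.pyGetD mm.1 x 0 then false else r)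
        r)
    true

-- ===== PORT B =====
def sao_proximas_alt (cor : List Int) : Bool :=
  match cor with
  | a :: b :: c :: _ => decide (max a (max b c) - min a (min b c) ≤ 5)
  | _ => false  -- unreachable under Pre_ (Python's unpack raises IndexError here)

-- ===== PRECONDITION & SPEC =====
-- Pre_ excludes only lists of fewer than 3 elements, on which A raises IndexError.
def Pre_sao_proximas (cor : List Int) : Prop := 3 ≤ cor.length
instance (cor : List Int) : Decidable (Pre_sao_proximas cor) := by unfold Pre_sao_proximas; infer_instance
def pvWitness_sao_proximas : List Int := [10, 12, 14]

def Spec_sao_proximas (cor : List Int) (out : Bool) : Prop := out = sao_proximas_alt cor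
instance (cor : List Int) (out : Bool) : Decidable (Spec_sao_proximas cor out) := by unfold Spec_sao_proximas; infer_instance

-- ===== CLAIM (what is proved, stated in full; the proofs are below) =====
def Claim_equal_sao_proximas : Prop := ∀ (cor : List Int), Dom_sao_proximas cor → Pre_sao_proximas cor → Spec_sao_proximas cor (sao_proximas cor)

-- ===== LEMMAS AND PROOFS =====
theorem pyRange3 : PySem.List.pyRange 0 3 1 = [0, 1, 2] := by decide

theorem pyGetD0 (a d : Int) (rest : List Int) :
    PySem.List.pyGetD (a :: rest) 0 d = a := by
  simp [PySem.List.pyGetD, PySem.List.pyGet?, PySem.List.pyIdx?]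

theorem pyGetD1 (a b d : Int) (rest : List Int) :
    PySem.List.pyGetD (a :: b :: rest) 1 d = b := by
  simp [PySem.List.pyGetD, PySem.List.pyGet?, PySem.List.pyIdx?]

theorem pyGetD2 (a b c d : Int) (rest : List Int) :
    PySem.List.pyGetD (a :: b :: c :: rest) 2 d = c := by
  simp [PySem.List.pyGetD, PySem.List.pyGet?, PySem.List.pyIdx?]
  rw [if_pos (by omega)]
  simp

-- ===== VERDICT (by name: the statement is the Claim_ definition above) =====
theorem sao_proximas_spec : Claim_equal_sao_proximas := by
  intro cor _ hpre
  unfold Pre_sao_proximas at hpre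
  match cor with
  | a :: b :: c :: rest =>
    unfold Spec_sao_proximas sao_proximas sao_proximas_alt
    rw [pyRange3]
    simp only [List.foldl, pyGetD0, pyGetD1, pyGetD2,
      show Int.toNat 0 = 0 from rfl, show Int.toNat 1 = 1 from rfl,
      show Int.toNat 2 = 2 from rfl, List.set]
    rw [Bool.eq_iff_iff]
    simp
    omega
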